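-- pv_equiv track=rewrite | github.com/marc-shade/enhanced-memory-mcp | model_router.py | map_model_id
-- ===== SOURCE A (Python) =====
-- CLAUDE_MODELS = {
--     "claude-sonnet-4.5": {
--         "anthropic": "claude-sonnet-4-5-20250929",
--         "openrouter": "anthropic/claude-sonnet-4.5",
--         "bedrock": "anthropic.claude-sonnet-4-5-v2:0",
--         "canonical": "Claude Sonnet 4.5"
--     },
--     "claude-opus-4.5": {
--         "anthropic": "claude-opus-4-5-20251101",
--         "openrouter": "anthropic/claude-opus-4.5",
--         "canonical": "Claude Opus 4.5"
--     },
--     "claude-3.5-sonnet": {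
--         "anthropic": "claude-3-5-sonnet-20241022",
--         "openrouter": "anthropic/claude-3.5-sonnet-20241022",
--         "bedrock": "anthropic.claude-3-5-sonnet-20241022-v2:0",
--         "canonical": "Claude 3.5 Sonnet"
--     },
--     "claude-3.5-haiku": {
--         "anthropic": "claude-3-5-haiku-20241022",
--         "openrouter": "anthropic/claude-3.5-haiku-20241022",
--         "canonical": "Claude 3.5 Haiku"
--     }
-- }
--
-- OPENAI_MODELS = {
--     "gpt-4o": {
--         "openai": "gpt-4o",
--         "openrouter": "openai/gpt-4o",
--         "canonical": "GPT-4o"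
--     },
--     "gpt-4o-mini": {
--         "openai": "gpt-4o-mini",
--         "openrouter": "openai/gpt-4o-mini",
--         "canonical": "GPT-4o Mini"
--     },
--     "o1": {
--         "openai": "o1",
--         "openrouter": "openai/o1",
--         "canonical": "O1"
--     },
--     "o1-mini": {
--         "openai": "o1-mini",
--         "openrouter": "openai/o1-mini",
--         "canonical": "O1 Mini"
--     }
-- }
--
-- def map_model_id(model_id: str, target_provider: str) -> str:
--     """Map model ID between providers."""
--     # Check Claude models
--     for canonical, mapping in CLAUDE_MODELS.items():
--         if model_id in [mapping.get("anthropic"), mapping.get("openrouter"),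
--                         mapping.get("bedrock"), canonical]:
--             return mapping.get(target_provider, model_id)
--
--     # Check OpenAI models
--     for canonical, mapping in OPENAI_MODELS.items():
--         if model_id in [mapping.get("openai"), mapping.get("openrouter"), canonical]:
--             return mapping.get(target_provider, model_id)
--
--     return model_id
-- ===== SOURCE B (Python) =====
-- CLAUDE_MODELS = {
--     "claude-sonnet-4.5": {
--         "anthropic": "claude-sonnet-4-5-20250929",
--         "openrouter": "anthropic/claude-sonnet-4.5",
--         "bedrock": "anthropic.claude-sonnet-4-5-v2:0",
--         "canonical": "Claude Sonnet 4.5"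
--     },
--     "claude-opus-4.5": {
--         "anthropic": "claude-opus-4-5-20251101",
--         "openrouter": "anthropic/claude-opus-4.5",
--         "canonical": "Claude Opus 4.5"
--     },
--     "claude-3.5-sonnet": {
--         "anthropic": "claude-3-5-sonnet-20241022",
--         "openrouter": "anthropic/claude-3.5-sonnet-20241022",
--         "bedrock": "anthropic.claude-3-5-sonnet-20241022-v2:0",
--         "canonical": "Claude 3.5 Sonnet"
--     },
--     "claude-3.5-haiku": {
--         "anthropic": "claude-3-5-haiku-20241022",
--         "openrouter": "anthropic/claude-3.5-haiku-20241022",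
--         "canonical": "Claude 3.5 Haiku"
--     }
-- }
--
-- OPENAI_MODELS = {
--     "gpt-4o": {
--         "openai": "gpt-4o",
--         "openrouter": "openai/gpt-4o",
--         "canonical": "GPT-4o"
--     },
--     "gpt-4o-mini": {
--         "openai": "gpt-4o-mini",
--         "openrouter": "openai/gpt-4o-mini",
--         "canonical": "GPT-4o Mini"
--     },
--     "o1": {
--         "openai": "o1",
--         "openrouter": "openai/o1",
--         "canonical": "O1"
--     },
--     "o1-mini": {
--         "openai": "o1-mini",
--         "openrouter": "openai/o1-mini",
--         "canonical": "O1 Mini"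
--     }
-- }
--
-- # Flat alias -> mapping index, built once at import time (first-wins, matching
-- # the scan order of the two loops in the original implementation).
-- ALIAS_TO_MAPPING = {}
-- for _canonical, _mapping in CLAUDE_MODELS.items():
--     for _alias in (_mapping.get("anthropic"), _mapping.get("openrouter"),
--                    _mapping.get("bedrock"), _canonical):
--         if _alias is not None:
--             ALIAS_TO_MAPPING.setdefault(_alias, _mapping)
-- for _canonical, _mapping in OPENAI_MODELS.items():
--     for _alias in (_mapping.get("openai"), _mapping.get("openrouter"), _canonical):
--         if _alias is not None:
--             ALIAS_TO_MAPPING.setdefault(_alias, _mapping)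
--
--
-- def map_model_id(model_id: str, target_provider: str) -> str:
--     """Map model ID between providers."""
--     mapping = ALIAS_TO_MAPPING.get(model_id)
--     if mapping is None:
--         return model_id
--     return mapping.get(target_provider, model_id)
-- ===== Notes on version B (the rewrite author's own statement) =====
-- stated objective: simpler
-- what changed: Replaces A's two sequential scans over the model tables (building a membership list per entry) with a flat alias-to-mapping dict built once at module scope with first-wins setdefault, so the function body is a single dict lookup.
import Mathlib
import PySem

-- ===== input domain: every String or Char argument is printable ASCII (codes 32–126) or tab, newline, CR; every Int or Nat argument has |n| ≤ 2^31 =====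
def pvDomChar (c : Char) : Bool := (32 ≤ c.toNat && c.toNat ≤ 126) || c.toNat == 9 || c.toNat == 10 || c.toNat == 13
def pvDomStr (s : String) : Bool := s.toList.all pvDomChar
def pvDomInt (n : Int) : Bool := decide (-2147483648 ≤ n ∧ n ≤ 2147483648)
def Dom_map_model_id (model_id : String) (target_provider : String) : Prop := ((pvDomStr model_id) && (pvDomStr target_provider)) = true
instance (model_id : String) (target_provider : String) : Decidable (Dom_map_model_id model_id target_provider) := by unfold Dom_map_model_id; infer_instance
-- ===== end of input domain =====

-- B replaces A's two linear scans over the model tables by a flat alias→mapping dict built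
-- once at module scope (first-wins setdefault), so lookup is a single dict get (objective: simpler/idiomatic).

-- shared module constants (both Pythons read the same CLAUDE_MODELS / OPENAI_MODELS tables)
def pvClaudeModels : List (String × PySem.Dict String String) :=
  [("claude-sonnet-4.5", PySem.Dict.mk
      [("anthropic", "claude-sonnet-4-5-20250929"),
       ("openrouter", "anthropic/claude-sonnet-4.5"),
       ("bedrock", "anthropic.claude-sonnet-4-5-v2:0"),
       ("canonical", "Claude Sonnet 4.5")]),
   ("claude-opus-4.5", PySem.Dict.mk
      [("anthropic", "claude-opus-4-5-20251101"),
       ("openrouter", "anthropic/claude-opus-4.5"),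
       ("canonical", "Claude Opus 4.5")]),
   ("claude-3.5-sonnet", PySem.Dict.mk
      [("anthropic", "claude-3-5-sonnet-20241022"),
       ("openrouter", "anthropic/claude-3.5-sonnet-20241022"),
       ("bedrock", "anthropic.claude-3-5-sonnet-20241022-v2:0"),
       ("canonical", "Claude 3.5 Sonnet")]),
   ("claude-3.5-haiku", PySem.Dict.mk
      [("anthropic", "claude-3-5-haiku-20241022"),
       ("openrouter", "anthropic/claude-3.5-haiku-20241022"),
       ("canonical", "Claude 3.5 Haiku")])]

def pvOpenaiModels : List (String × PySem.Dict String String) :=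
  [("gpt-4o", PySem.Dict.mk
      [("openai", "gpt-4o"), ("openrouter", "openai/gpt-4o"), ("canonical", "GPT-4o")]),
   ("gpt-4o-mini", PySem.Dict.mk
      [("openai", "gpt-4o-mini"), ("openrouter", "openai/gpt-4o-mini"), ("canonical", "GPT-4o Mini")]),
   ("o1", PySem.Dict.mk
      [("openai", "o1"), ("openrouter", "openai/o1"), ("canonical", "O1")]),
   ("o1-mini", PySem.Dict.mk
      [("openai", "o1-mini"), ("openrouter", "openai/o1-mini"), ("canonical", "O1 Mini")])]

-- ===== PORT A =====
-- the first loop of A: scan CLAUDE_MODELS, membership list [get "anthropic", get "openrouter", get "bedrock", canonical]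
def pvLoopClaude (model_id target_provider : String) :
    List (String × PySem.Dict String String) → Option String
  | [] => none
  | (canonical, mapping) :: rest =>
    if some model_id ∈ [mapping.get? "anthropic", mapping.get? "openrouter",
                        mapping.get? "bedrock", some canonical] then
      some (mapping.getD target_provider model_id)
    else pvLoopClaude model_id target_provider rest

-- the second loop of A: scan OPENAI_MODELS, membership list [get "openai", get "openrouter", canonical]
def pvLoopOpenai (model_id target_provider : String) :
    List (String × PySem.Dict String String) → Option String
  | [] => none
  | (canonical, mapping) :: rest =>
    if some model_id ∈ [mapping.get? "openai", mapping.get? "openrouter", some canonical] then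
      some (mapping.getD target_provider model_id)
    else pvLoopOpenai model_id target_provider rest

def map_model_id (model_id : String) (target_provider : String) : String :=
  match pvLoopClaude model_id target_provider pvClaudeModels with
  | some r => r
  | none =>
    match pvLoopOpenai model_id target_provider pvOpenaiModels with
    | some r => r
    | none => model_id

-- ===== PORT B =====
-- module-scope ALIAS_TO_MAPPING: first-wins (setdefault) insertion of every alias of every entry
def pvAliasToMapping : PySem.Dict String (PySem.Dict String String) :=
  let d1 := pvClaudeModels.foldl (fun d p =>
    [p.2.get? "anthropic", p.2.get? "openrouter", p.2.get? "bedrock", some p.1].foldl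
      (fun d a => match a with
        | some al => d.setdefault al p.2
        | none => d) d) PySem.Dict.empty
  pvOpenaiModels.foldl (fun d p =>
    [p.2.get? "openai", p.2.get? "openrouter", some p.1].foldl
      (fun d a => match a with
        | some al => d.setdefault al p.2
        | none => d) d) d1

def map_model_id_alt (model_id : String) (target_provider : String) : String :=
  match pvAliasToMapping.get? model_id with
  | some mapping => mapping.getD target_provider model_id
  | none => model_id

-- ===== PRECONDITION & SPEC =====
def Spec_map_model_id (model_id : String) (target_provider : String) (out : String) : Prop := out = map_model_id_alt model_id target_provider
instance (model_id : String) (target_provider : String) (out : String) : Decidable (Spec_map_model_id model_id target_provider out) := by unfold Spec_map_model_id; infer_instance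

-- ===== CLAIM (what is proved, stated in full; the proofs are below) =====
def Claim_equal_map_model_id : Prop := ∀ (model_id : String) (target_provider : String), Dom_map_model_id model_id target_provider → Spec_map_model_id model_id target_provider (map_model_id model_id target_provider)

-- ===== LEMMAS AND PROOFS =====

-- the 22 alias strings that occur as keys of ALIAS_TO_MAPPING (= all strings A's membership tests can match)
def pvAliases : List String :=
  ["claude-sonnet-4-5-20250929", "anthropic/claude-sonnet-4.5",
   "anthropic.claude-sonnet-4-5-v2:0", "claude-sonnet-4.5",
   "claude-opus-4-5-20251101", "anthropic/claude-opus-4.5", "claude-opus-4.5",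
   "claude-3-5-sonnet-20241022", "anthropic/claude-3.5-sonnet-20241022",
   "anthropic.claude-3-5-sonnet-20241022-v2:0", "claude-3.5-sonnet",
   "claude-3-5-haiku-20241022", "anthropic/claude-3.5-haiku-20241022", "claude-3.5-haiku",
   "gpt-4o", "openai/gpt-4o", "gpt-4o-mini", "openai/gpt-4o-mini",
   "o1", "openai/o1", "o1-mini", "openai/o1-mini"]

theorem pvAliasToMapping_keys : pvAliasToMapping.keys = pvAliases := rfl

-- on a string matching no alias, both programs fall through and return model_id itself
theorem pv_miss (m t : String) (h : m ∉ pvAliases) :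
    map_model_id m t = m ∧ map_model_id_alt m t = m := by
  constructor
  · simp [pvAliases] at h
    obtain ⟨h1, h2, h3, h4, h5, h6, h7, h8, h9, h10, h11, h12, h13, h14, h15, h16, h17,
      h18, h19, h20, h21, h22⟩ := h
    simp [map_model_id, pvLoopClaude, pvLoopOpenai, pvClaudeModels, pvOpenaiModels,
      PySem.Dict.get?, h1, h2, h3, h4, h5, h6, h7, h8, h9, h10, h11, h12, h13, h14, h15,
      h16, h17, h18, h19, h20, h21, h22]
  · have hg : pvAliasToMapping.get? m = none := by
      simp [PySem.Dict.get?_eq_none_iff_not_mem_keys, pvAliasToMapping_keys, h]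
    simp [map_model_id_alt, hg]

-- ===== VERDICT (by name: the statement is the Claim_ definition above) =====
theorem map_model_id_spec : Claim_equal_map_model_id := by
  intro m t _
  unfold Spec_map_model_id
  by_cases h : m ∈ pvAliases
  · fin_cases h <;> rfl
  · obtain ⟨hA, hB⟩ := pv_miss m t h
    rw [hA, hB]
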